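-- pv_equiv track=rewrite | github.com/eharquin/ai27-projet | projet/client/crocomine.py | base_info_animal_to_clauses
-- ===== SOURCE A (Python) =====
-- from typing import List, Tuple, Dict
--
-- SHARK = 1
--
-- TIGER = 2
--
-- CROCODILE = 3
--
-- def base_info_animal_to_clauses(noShark: bool, noTiger: bool, noCrocodile: bool, dict: Dict) -> List[List[int]]:
--
--     l = []
--     for i in range(1, len(dict)):
--         if(noShark):
--             if(dict[i][3] == SHARK):
--                 l.append([-i])
--
--         if(noTiger):
--             if(dict[i][3] == TIGER):
--                 l.append([-i])
--
--         if(noCrocodile):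
--             if(dict[i][3] == CROCODILE):
--                 l.append([-i])
--
--     return l
-- ===== SOURCE B (Python) =====
-- SHARK = 1
-- TIGER = 2
-- CROCODILE = 3
--
-- def base_info_animal_to_clauses(noShark: bool, noTiger: bool, noCrocodile: bool, dict):
--     # staged per-type passes: collect matching indices for each banned animal type
--     # separately, then sort the union back into index order and negate.
--     hits = []
--     for animal, banned in ((SHARK, noShark), (TIGER, noTiger), (CROCODILE, noCrocodile)):
--         if banned:
--             hits.extend(i for i in range(1, len(dict)) if dict[i][3] == animal)
--     hits.sort()
--     return [[-i] for i in hits]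
-- ===== Notes on version B (the rewrite author's own statement) =====
-- stated objective: alternative
-- what changed: Instead of one pass with three stacked flag/type branches, B makes a separate pass per banned animal type collecting matching indices, then sorts the union back into index order (correct because each entry has exactly one type, so the union is exactly A's matches).
import Mathlib
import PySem

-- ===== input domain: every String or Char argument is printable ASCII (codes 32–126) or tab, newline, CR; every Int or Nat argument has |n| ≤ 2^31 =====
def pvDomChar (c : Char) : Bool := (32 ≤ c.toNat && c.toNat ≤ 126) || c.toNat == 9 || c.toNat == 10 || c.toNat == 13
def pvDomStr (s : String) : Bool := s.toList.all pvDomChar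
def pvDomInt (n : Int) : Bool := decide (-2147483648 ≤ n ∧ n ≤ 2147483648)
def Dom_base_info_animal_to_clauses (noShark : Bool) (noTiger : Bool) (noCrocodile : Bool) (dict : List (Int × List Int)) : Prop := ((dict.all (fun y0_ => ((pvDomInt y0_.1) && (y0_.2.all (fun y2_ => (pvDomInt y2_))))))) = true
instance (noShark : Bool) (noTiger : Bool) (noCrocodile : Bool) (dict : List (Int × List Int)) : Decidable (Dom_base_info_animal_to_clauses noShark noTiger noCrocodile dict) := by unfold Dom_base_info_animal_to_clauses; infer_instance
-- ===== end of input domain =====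

-- B replaces A's single pass with three stacked branches by one separate pass per
-- banned animal type followed by a sort of the collected indices (objective: alternative).

-- shared helper: dict[i][3] as an Option (none = KeyError/IndexError)
def pvFetch (d : PySem.Dict Int (List Int)) (i : Int) : Option Int :=
  (d.get? i).bind (fun v => PySem.List.pyGet? v 3)

-- ===== PORT A =====
def base_info_animal_to_clauses (noShark : Bool) (noTiger : Bool) (noCrocodile : Bool) (dict : List (Int × List Int)) : List (List Int) :=
  let d := PySem.Dict.ofList dict
  (PySem.List.pyRange 1 d.size 1).foldl (fun l i =>
    let l := if noShark && (pvFetch d i == some 1) then l ++ [[-i]] else l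
    let l := if noTiger && (pvFetch d i == some 2) then l ++ [[-i]] else l
    if noCrocodile && (pvFetch d i == some 3) then l ++ [[-i]] else l) []

-- ===== PORT B =====
def base_info_animal_to_clauses_alt (noShark : Bool) (noTiger : Bool) (noCrocodile : Bool) (dict : List (Int × List Int)) : List (List Int) :=
  let d := PySem.Dict.ofList dict
  let hits := [((1 : Int), noShark), (2, noTiger), (3, noCrocodile)].foldl
    (fun acc p =>
      if p.2 then acc ++ (PySem.List.pyRange 1 d.size 1).filter (fun i => pvFetch d i == some p.1)
      else acc) []
  (PySem.List.sorted hits (fun x => x) false).map (fun i => [-i])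

-- ===== PRECONDITION & SPEC =====
-- Pre_ excludes exactly the inputs where Python A raises: some flag is True and some key
-- i in range(1, len(dict)) is missing (KeyError) or its value has fewer than 4 elements (IndexError).
def Pre_base_info_animal_to_clauses (noShark : Bool) (noTiger : Bool) (noCrocodile : Bool) (dict : List (Int × List Int)) : Prop :=
  (noShark || noTiger || noCrocodile) = true →
    ∀ i ∈ PySem.List.pyRange 1 (PySem.Dict.ofList dict).size 1,
      (((PySem.Dict.ofList dict).get? i).any (fun v => decide (4 ≤ v.length))) = true
instance (noShark : Bool) (noTiger : Bool) (noCrocodile : Bool) (dict : List (Int × List Int)) : Decidable (Pre_base_info_animal_to_clauses noShark noTiger noCrocodile dict) := by unfold Pre_base_info_animal_to_clauses; infer_instance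

def pvWitness_base_info_animal_to_clauses : Bool × Bool × Bool × (List (Int × List Int)) :=
  (true, false, false, [(1, [0, 0, 0, 2]), (2, [0, 0, 0, 1])])

def Spec_base_info_animal_to_clauses (noShark : Bool) (noTiger : Bool) (noCrocodile : Bool) (dict : List (Int × List Int)) (out : List (List Int)) : Prop := out = base_info_animal_to_clauses_alt noShark noTiger noCrocodile dict
instance (noShark : Bool) (noTiger : Bool) (noCrocodile : Bool) (dict : List (Int × List Int)) (out : List (List Int)) : Decidable (Spec_base_info_animal_to_clauses noShark noTiger noCrocodile dict out) := by unfold Spec_base_info_animal_to_clauses; infer_instance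

-- ===== CLAIM =====
def Claim_equal_base_info_animal_to_clauses : Prop := ∀ (noShark : Bool) (noTiger : Bool) (noCrocodile : Bool) (dict : List (Int × List Int)), Dom_base_info_animal_to_clauses noShark noTiger noCrocodile dict → Pre_base_info_animal_to_clauses noShark noTiger noCrocodile dict → Spec_base_info_animal_to_clauses noShark noTiger noCrocodile dict (base_info_animal_to_clauses noShark noTiger noCrocodile dict)

-- ===== LEMMAS AND PROOFS =====

-- A's per-iteration body appends [-i] exactly when the combined condition holds
-- (the three branches are mutually exclusive, since dict[i][3] is one value).
def pvCond (noShark noTiger noCrocodile : Bool) (d : PySem.Dict Int (List Int)) (i : Int) : Bool :=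
  (noShark && (pvFetch d i == some 1)) || (noTiger && (pvFetch d i == some 2)) || (noCrocodile && (pvFetch d i == some 3))

theorem pvStepA (noShark noTiger noCrocodile : Bool) (d : PySem.Dict Int (List Int)) (l : List (List Int)) (i : Int) :
    (let l := if noShark && (pvFetch d i == some 1) then l ++ [[-i]] else l
     let l := if noTiger && (pvFetch d i == some 2) then l ++ [[-i]] else l
     if noCrocodile && (pvFetch d i == some 3) then l ++ [[-i]] else l)
    = if pvCond noShark noTiger noCrocodile d i then l ++ [[-i]] else l := by
  unfold pvCond
  cases h : pvFetch d i with
  | none => simp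
  | some x =>
    by_cases h1 : x = 1 <;> by_cases h2 : x = 2 <;> by_cases h3 : x = 3 <;>
      simp_all

-- disjoint filters concatenate to the filter of the disjunction, up to permutation
theorem pvFilterOrPerm {α : Type} (p q : α → Bool) (h : ∀ x, ¬(p x = true ∧ q x = true)) :
    ∀ l : List α, ((l.filter p) ++ (l.filter q)).Perm (l.filter (fun x => p x || q x)) := by
  intro l
  induction l with
  | nil => simp
  | cons x t ih =>
    by_cases hp : p x = true
    · have hq : q x = false := by
        cases hqq : q x
        · rfl
        · exact absurd ⟨hp, hqq⟩ (h x)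
      simp only [List.filter_cons, hp, hq, Bool.true_or, if_true, Bool.false_eq_true, if_false,
        List.cons_append]
      exact ih.cons x
    · have hp' : p x = false := by cases hpp : p x; rfl; exact absurd hpp hp
      by_cases hq : q x = true
      · simp only [List.filter_cons, hp', hq, Bool.false_or, Bool.false_eq_true, if_false, if_true]
        exact (List.perm_middle).trans (ih.cons x)
      · have hq' : q x = false := by cases hqq : q x; rfl; exact absurd hqq hq
        simp only [List.filter_cons, hp', hq', Bool.false_or, Bool.false_eq_true, if_false]
        exact ih

-- the filtered range is strictly increasing
theorem pvFilterRangePairwise (n : Int) (p : Int → Bool) :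
    ((PySem.List.pyRange 1 n 1).filter p).Pairwise (· < ·) :=
  (PySem.List.pairwise_lt_pyRange_one 1 n).filter p

-- B's sorted hit list equals the filter of the combined condition
theorem pvSortedHits (noShark noTiger noCrocodile : Bool) (d : PySem.Dict Int (List Int)) :
    PySem.List.sorted
      ([((1 : Int), noShark), (2, noTiger), (3, noCrocodile)].foldl
        (fun acc p =>
          if p.2 then acc ++ (PySem.List.pyRange 1 d.size 1).filter (fun i => pvFetch d i == some p.1)
          else acc) [])
      (fun x => x) false
    = (PySem.List.pyRange 1 d.size 1).filter (pvCond noShark noTiger noCrocodile d) := by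
  set r := PySem.List.pyRange 1 d.size 1 with hr
  have hdisj : ∀ (a b : Int), a ≠ b → ∀ i, ¬((pvFetch d i == some a) = true ∧ (pvFetch d i == some b) = true) := by
    intro a b hab i ⟨h1, h2⟩
    simp only [beq_iff_eq] at h1 h2
    exact hab (Option.some.inj (h1 ▸ h2))
  have c1 : ∀ nS nT nC, pvCond nS nT nC d =
      fun i => (nS && (pvFetch d i == some 1)) || (nT && (pvFetch d i == some 2)) || (nC && (pvFetch d i == some 3)) := by
    intro nS nT nC; funext i; rfl
  apply PySem.List.sorted_eq_of_perm_of_pairwise_lt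
  · -- permutation: the combined filter is a permutation of the concatenated per-type filters
    cases noShark <;> cases noTiger <;> cases noCrocodile <;>
      simp only [List.foldl_cons, List.foldl_nil, Bool.false_eq_true, if_false, if_true,
        List.nil_append, c1, Bool.false_and, Bool.true_and, Bool.false_or,
        Bool.or_false]
    · rw [List.filter_false]
    · exact List.Perm.refl _
    · exact List.Perm.refl _
    · exact (pvFilterOrPerm (fun i => pvFetch d i == some 2) (fun i => pvFetch d i == some 3)
        (hdisj 2 3 (by decide)) r).symm
    · exact List.Perm.refl _
    · exact (pvFilterOrPerm (fun i => pvFetch d i == some 1) (fun i => pvFetch d i == some 3)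
        (hdisj 1 3 (by decide)) r).symm
    · exact (pvFilterOrPerm (fun i => pvFetch d i == some 1) (fun i => pvFetch d i == some 2)
        (hdisj 1 2 (by decide)) r).symm
    · have h12 := pvFilterOrPerm (fun i => pvFetch d i == some 1) (fun i => pvFetch d i == some 2)
        (hdisj 1 2 (by decide)) r
      have h123 := pvFilterOrPerm (fun i => (pvFetch d i == some 1) || (pvFetch d i == some 2))
        (fun i => pvFetch d i == some 3) (by
          intro i ⟨h12', h3⟩
          rcases Bool.or_eq_true_iff.mp h12' with h | h
          · exact hdisj 1 3 (by decide) i ⟨h, h3⟩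
          · exact hdisj 2 3 (by decide) i ⟨h, h3⟩) r
      exact (h123.symm.trans (h12.symm.append_right _))
  · exact pvFilterRangePairwise d.size _
-- ===== VERDICT (below) =====

theorem base_info_animal_to_clauses_spec : Claim_equal_base_info_animal_to_clauses := by
  intro noShark noTiger noCrocodile dict _ _
  unfold Spec_base_info_animal_to_clauses base_info_animal_to_clauses base_info_animal_to_clauses_alt
  simp only []
  set d := PySem.Dict.ofList dict with hd
  have hfold :
      (PySem.List.pyRange 1 d.size 1).foldl (fun l i =>
        let l := if noShark && (pvFetch d i == some 1) then l ++ [[-i]] else l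
        let l := if noTiger && (pvFetch d i == some 2) then l ++ [[-i]] else l
        if noCrocodile && (pvFetch d i == some 3) then l ++ [[-i]] else l) []
      = ((PySem.List.pyRange 1 d.size 1).filter (pvCond noShark noTiger noCrocodile d)).map (fun i => [-i]) := by
    have := PySem.List.foldl_append_if (l := PySem.List.pyRange 1 d.size 1)
      (p := pvCond noShark noTiger noCrocodile d) (f := fun i => [-i]) (acc := ([] : List (List Int)))
    simp only [List.nil_append] at this
    rw [← this]
    congr 1
    funext l i
    exact pvStepA noShark noTiger noCrocodile d l i
  rw [hfold, pvSortedHits]
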